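-- pv_equiv track=rewrite | github.com/V3D4NTH/pessatui | bars.py | marks_awarded
-- ===== SOURCE A (Python) =====
-- def marks_awarded(questions):
--     marks = 0
--     for i in questions:
--         if i[1] == False:
--             if i[0] == "1\n":
--                 marks += 4
--
--             elif i[0] == "2\n":
--                 marks += 3
--
--             elif i[0] == "3\n":
--                 marks += 2
--
--             elif i[0] == "4\n":
--                 marks += 1
--         else:
--             if i[0] == "1\n":
--                 marks += 1
--
--             elif i[0] == "2\n":
--                 marks += 2
--
--             elif i[0] =="3\n":
--                 marks += 3
--
--             elif i[0] == "4\n":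
--                 marks += 4
--
--     return marks
-- ===== SOURCE B (Python) =====
-- SCORE = {
--     ("1\n", False): 4, ("2\n", False): 3, ("3\n", False): 2, ("4\n", False): 1,
--     ("1\n", True): 1, ("2\n", True): 2, ("3\n", True): 3, ("4\n", True): 4,
-- }
--
-- def marks_awarded(questions):
--     counts = {}
--     for q in questions:
--         key = (q[0], q[1])
--         counts[key] = counts.get(key, 0) + 1
--     return sum(SCORE.get(k, 0) * c for k, c in counts.items())
-- ===== Notes on version B (the rewrite author's own statement) =====
-- stated objective: alternative
-- what changed: Instead of branching per element, B tallies the questions into a counter keyed by (answer, correctness) and then computes one weighted sum of the counts against a fixed module-level score table, so the per-element if/elif chains disappear.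
import Mathlib
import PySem

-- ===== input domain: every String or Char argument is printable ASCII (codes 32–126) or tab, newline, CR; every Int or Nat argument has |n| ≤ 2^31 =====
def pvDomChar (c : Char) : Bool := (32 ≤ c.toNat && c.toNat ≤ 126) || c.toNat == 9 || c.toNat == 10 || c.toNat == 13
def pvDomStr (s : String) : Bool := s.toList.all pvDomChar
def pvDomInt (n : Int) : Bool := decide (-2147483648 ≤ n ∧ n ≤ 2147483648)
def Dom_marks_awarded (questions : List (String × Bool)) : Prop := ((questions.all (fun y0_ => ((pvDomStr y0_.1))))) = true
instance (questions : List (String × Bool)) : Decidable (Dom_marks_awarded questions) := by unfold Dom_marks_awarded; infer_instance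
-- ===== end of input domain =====

-- B restructures the computation: one tallying pass builds a Counter keyed by (answer, correctness), then a weighted-sum pass over a fixed score table; objective: alternative (same O(n) cost, no per-element branch chain).


-- ===== PORT A =====
def marks_awarded (questions : List (String × Bool)) : Int :=
  questions.foldl (fun marks i =>
    if i.2 = false then
      if i.1 = "1\n" then marks + 4
      else if i.1 = "2\n" then marks + 3
      else if i.1 = "3\n" then marks + 2
      else if i.1 = "4\n" then marks + 1
      else marks
    else
      if i.1 = "1\n" then marks + 1
      else if i.1 = "2\n" then marks + 2
      else if i.1 = "3\n" then marks + 3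
      else if i.1 = "4\n" then marks + 4
      else marks) 0

-- ===== PORT B =====
-- the module-level SCORE dict of Source B
def pvScore : PySem.Dict (String × Bool) Int :=
  PySem.Dict.ofList
    [(("1\n", false), 4), (("2\n", false), 3), (("3\n", false), 2), (("4\n", false), 1),
     (("1\n", true), 1), (("2\n", true), 2), (("3\n", true), 3), (("4\n", true), 4)]

def marks_awarded_alt (questions : List (String × Bool)) : Int :=
  let counts : PySem.Dict (String × Bool) Int :=
    questions.foldl (fun d q =>
      let key := (q.1, q.2)
      d.insert key (d.getD key 0 + 1)) PySem.Dict.empty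
  counts.items.foldl (fun acc kc => acc + pvScore.getD kc.1 0 * kc.2) 0

-- ===== PRECONDITION & SPEC =====
def Spec_marks_awarded (questions : List (String × Bool)) (out : Int) : Prop := out = marks_awarded_alt questions
instance (questions : List (String × Bool)) (out : Int) : Decidable (Spec_marks_awarded questions out) := by unfold Spec_marks_awarded; infer_instance

-- ===== CLAIM (what is proved, stated in full; the proofs are below) =====
def Claim_equal_marks_awarded : Prop := ∀ (questions : List (String × Bool)), Dom_marks_awarded questions → Spec_marks_awarded questions (marks_awarded questions)

-- ===== LEMMAS AND PROOFS =====

-- a key matching none of the four answers is absent from the score table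
theorem pv_score_miss (s : String) (b : Bool) (h1 : s ≠ "1\n") (h2 : s ≠ "2\n")
    (h3 : s ≠ "3\n") (h4 : s ≠ "4\n") : pvScore.getD (s, b) 0 = 0 := by
  simp [pvScore, PySem.Dict.ofList, PySem.Dict.update, PySem.Dict.getD_insert,
    PySem.Dict.getD_empty, Prod.mk.injEq, h1, h2, h3, h4]

-- A's per-element branch adds exactly the score-table weight of the element.
theorem pv_step_eq (m : Int) (q : String × Bool) :
    (if q.2 = false then
      if q.1 = "1\n" then m + 4
      else if q.1 = "2\n" then m + 3
      else if q.1 = "3\n" then m + 2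
      else if q.1 = "4\n" then m + 1
      else m
    else
      if q.1 = "1\n" then m + 1
      else if q.1 = "2\n" then m + 2
      else if q.1 = "3\n" then m + 3
      else if q.1 = "4\n" then m + 4
      else m) = m + pvScore.getD q 0 := by
  obtain ⟨s, b⟩ := q
  by_cases h1 : s = "1\n" <;> by_cases h2 : s = "2\n" <;> by_cases h3 : s = "3\n" <;>
    by_cases h4 : s = "4\n" <;> cases b <;>
    simp_all [pv_score_miss] <;> decide

-- the two BEq instances on String × Bool count identically (both lawful)
theorem pv_count_eq [inst : BEq (String × Bool)] [LawfulBEq (String × Bool)]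
    (k : String × Bool) (l : List (String × Bool)) :
    @List.count _ inst k l = @List.count _ instBEqOfDecidableEq k l := by
  induction l with
  | nil => rfl
  | cons x t ih => simp only [List.count_cons, ih]; congr 1; simp [beq_iff_eq]

-- (PySem.Set.ofList l) has the same elements as l, as a Finset.
theorem pv_toFinset_ofList (l : List (String × Bool)) :
    (PySem.Set.ofList l).toFinset = l.toFinset := by
  ext x
  simp [PySem.Set.mem_ofList]

-- weighted sum over the distinct elements with multiplicities = plain sum over the list
theorem pv_wsum (w : (String × Bool) → Int) (l : List (String × Bool)) :
    ((PySem.Set.ofList l).map (fun k => w k * (l.count k : Int))).sum = (l.map w).sum := by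
  have hnd : (PySem.Set.ofList l).Nodup := PySem.Set.nodup_ofList l
  calc ((PySem.Set.ofList l).map (fun k => w k * (l.count k : Int))).sum
      = ∑ k ∈ (PySem.Set.ofList l).toFinset, w k * (l.count k : Int) := by
        rw [List.sum_toFinset _ hnd]
    _ = ∑ k ∈ l.toFinset, (@List.count _ instBEqOfDecidableEq k l) • w k := by
        rw [pv_toFinset_ofList]
        exact Finset.sum_congr rfl (fun k _ => by rw [pv_count_eq]; simp [mul_comm])
    _ = (l.map w).sum := (Finset.sum_list_map_count l w).symm

-- ===== VERDICT (by name: the statement is the Claim_ definition above) =====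
theorem marks_awarded_spec : Claim_equal_marks_awarded := by
  intro questions _
  unfold Spec_marks_awarded marks_awarded marks_awarded_alt
  have hc : (questions.foldl (fun d q =>
      let key := (q.1, q.2)
      d.insert key (d.getD key 0 + 1)) PySem.Dict.empty) = PySem.Dict.counter questions :=
    PySem.Dict.foldl_insert_getD_add_one_eq_counter questions
  have hA : (fun (marks : Int) (i : String × Bool) =>
      if i.2 = false then
        if i.1 = "1\n" then marks + 4
        else if i.1 = "2\n" then marks + 3
        else if i.1 = "3\n" then marks + 2
        else if i.1 = "4\n" then marks + 1
        else marks
      else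
        if i.1 = "1\n" then marks + 1
        else if i.1 = "2\n" then marks + 2
        else if i.1 = "3\n" then marks + 3
        else if i.1 = "4\n" then marks + 4
        else marks) = fun m i => m + pvScore.getD i 0 := by
    funext m i; exact pv_step_eq m i
  rw [hA, hc]
  show List.foldl (fun m i => m + pvScore.getD i 0) 0 questions =
    List.foldl (fun acc kc => acc + pvScore.getD kc.1 0 * kc.2) 0 (PySem.Dict.counter questions).items
  rw [PySem.Dict.items_counter, PySem.List.foldl_add, PySem.List.foldl_add, List.map_map]
  simp only [zero_add]
  exact (pv_wsum (fun k => pvScore.getD k 0) questions).symm
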